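-- pv_equiv track=rewrite | github.com/bksuh/code_practice | 백준/Bronze/15953. 상금 헌터/상금 헌터.py | prize_2017
-- ===== SOURCE A (Python) =====
-- def prize_2017(rank):
--     prize_table = [500, 300, 200, 50, 30, 10]
--     rank_limit = [1, 2, 3, 4, 5, 6]
--
--     if rank == 0 or rank > 21:
--         return 0
--
--     total_people = 0
--     for i in range(len(prize_table)):
--         total_people += rank_limit[i]
--         if rank <= total_people:
--             return prize_table[i] * 10000
--     return 0
-- ===== SOURCE B (Python) =====
-- def prize_2017(rank):
--     if rank == 0 or rank > 21:
--         return 0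
--     thresholds = [1, 3, 6, 10, 15, 21]
--     prizes = [500, 300, 200, 50, 30, 10]
--     lo, hi = 0, len(thresholds)
--     while lo < hi:
--         mid = (lo + hi) // 2
--         if thresholds[mid] < rank:
--             lo = mid + 1
--         else:
--             hi = mid
--     return prizes[lo] * 10000
-- ===== Notes on version B (the rewrite author's own statement) =====
-- stated objective: alternative
-- what changed: Replaced the linear accumulate-and-early-return scan over the per-rank table with a precomputed cumulative threshold table located by a hand-written binary search (bisect_left), keeping the guard that out-of-range ranks win nothing.
import Mathlib
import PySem

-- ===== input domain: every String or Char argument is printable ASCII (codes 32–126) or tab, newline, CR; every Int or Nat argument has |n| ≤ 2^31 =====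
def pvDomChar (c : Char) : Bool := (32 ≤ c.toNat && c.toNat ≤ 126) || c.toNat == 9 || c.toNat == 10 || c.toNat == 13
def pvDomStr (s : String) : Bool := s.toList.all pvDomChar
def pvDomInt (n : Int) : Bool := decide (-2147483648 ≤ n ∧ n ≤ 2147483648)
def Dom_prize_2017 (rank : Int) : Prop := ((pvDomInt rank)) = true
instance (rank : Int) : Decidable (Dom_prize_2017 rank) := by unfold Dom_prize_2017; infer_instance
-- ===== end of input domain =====

-- B replaces A's linear accumulate-and-early-return scan with a cumulative threshold table located by binary search (alternative structure, same cost class).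

-- ===== PORT A =====
-- the for-loop over range(len(prize_table)) with early return, as structural recursion over the index list
def prizeLoopA (rank : Int) (pt rl : List Int) (idxs : List Nat) (total : Int) : Int :=
  match idxs with
  | [] => 0
  | i :: rest =>
    let total' := total + rl.getD i 0
    if rank ≤ total' then pt.getD i 0 * 10000
    else prizeLoopA rank pt rl rest total'

def prize_2017 (rank : Int) : Int :=
  let prize_table : List Int := [500, 300, 200, 50, 30, 10]
  let rank_limit : List Int := [1, 2, 3, 4, 5, 6]
  if rank == 0 || rank > 21 then 0
  else prizeLoopA rank prize_table rank_limit (List.range prize_table.length) 0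

-- ===== PORT B =====
-- the while-loop binary search (bisect_left) of Source B; fuel only makes the loop structurally total
def bsearchB (thresholds : List Int) (rank : Int) : Nat → Nat → Nat → Nat
  | 0, lo, _ => lo
  | fuel + 1, lo, hi =>
    if lo < hi then
      let mid := (lo + hi) / 2
      if thresholds.getD mid 0 < rank then bsearchB thresholds rank fuel (mid + 1) hi
      else bsearchB thresholds rank fuel lo mid
    else lo

def prize_2017_alt (rank : Int) : Int :=
  if rank == 0 || rank > 21 then 0
  else
    let thresholds : List Int := [1, 3, 6, 10, 15, 21]
    let prizes : List Int := [500, 300, 200, 50, 30, 10]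
    prizes.getD (bsearchB thresholds rank thresholds.length 0 thresholds.length) 0 * 10000

-- ===== PRECONDITION & SPEC =====
def Spec_prize_2017 (rank : Int) (out : Int) : Prop := out = prize_2017_alt rank
instance (rank : Int) (out : Int) : Decidable (Spec_prize_2017 rank out) := by unfold Spec_prize_2017; infer_instance

-- ===== CLAIM (what is proved, stated in full; the proofs are below) =====
def Claim_equal_prize_2017 : Prop := ∀ (rank : Int), Dom_prize_2017 rank → Spec_prize_2017 rank (prize_2017 rank)

-- ===== LEMMAS AND PROOFS =====
theorem bsearchB_nonpos (rank : Int) (h : rank ≤ 0) :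
    bsearchB [1, 3, 6, 10, 15, 21] rank 6 0 6 = 0 := by
  rw [bsearchB]; norm_num
  rw [if_neg (by omega : ¬ (10:Int) < rank)]
  rw [bsearchB]; norm_num
  rw [if_neg (by omega : ¬ (3:Int) < rank)]
  rw [bsearchB]; norm_num
  rw [if_neg (by omega : ¬ (1:Int) < rank)]
  rw [bsearchB]; norm_num

-- ===== VERDICT (by name: the statement is the Claim_ definition above) =====
theorem prize_2017_spec : Claim_equal_prize_2017 := by
  intro rank _
  unfold Spec_prize_2017
  by_cases h21 : rank > 21
  · simp [prize_2017, prize_2017_alt, h21]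
  · by_cases hpos : 1 ≤ rank
    · interval_cases rank <;> decide
    · -- rank ≤ 0; if rank = 0 both guards fire, otherwise both land in the first bracket
      by_cases h0 : rank = 0
      · simp [prize_2017, prize_2017_alt, h0]
      · have hle : rank ≤ 0 := by omega
        simp only [prize_2017, prize_2017_alt, List.length]
        rw [bsearchB_nonpos rank hle]
        simp [prizeLoopA, List.range, List.range.loop, h0, h21]
        omega
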